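-- pv_equiv track=rewrite | github.com/bsinger98/Incalmo | incalmo/core/actions/LowLevel/FindSSHConfig.py | parse_ssh_config
-- ===== SOURCE A (Python) =====
-- def parse_ssh_config(config):
--     hosts: dict[str, dict] = {}
--     current_host = None
--
--     for line in config.splitlines():
--         line = line.strip()
--         if line.startswith("Host "):
--             current_host = line.split(" ", 1)[1]
--             hosts[current_host] = {}
--         elif current_host and line:
--             key, value = line.split(" ", 1)
--             hosts[current_host][key] = value
--
--     return hosts
-- ===== SOURCE B (Python) =====
-- def parse_ssh_config(config):
--     stripped = [line.strip() for line in config.splitlines()]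
--     hosts = {}
--     for name, body in _host_blocks(stripped):
--         entry = {}
--         for line in body:
--             if line:
--                 key, value = line.split(" ", 1)
--                 entry[key] = value
--         hosts[name] = entry
--     return hosts
--
--
-- def _host_blocks(lines):
--     """Split stripped lines into (hostname, body-lines) blocks, one per 'Host ' header;
--     lines before the first header are discarded."""
--     blocks = []
--     i = 0
--     n = len(lines)
--     while i < n:
--         if lines[i].startswith("Host "):
--             j = i + 1
--             while j < n and not lines[j].startswith("Host "):
--                 j += 1
--             blocks.append((lines[i].split(" ", 1)[1], lines[i + 1:j]))
--             i = j
--         else: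
--             i += 1
--     return blocks
-- ===== Notes on version B (the rewrite author's own statement) =====
-- stated objective: alternative
-- what changed: B first groups the stripped lines into (hostname, body) blocks at the 'Host ' headers, then parses each block's body into a dict in a second pass, instead of A's single stateful line loop carrying a current_host.
import Mathlib
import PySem

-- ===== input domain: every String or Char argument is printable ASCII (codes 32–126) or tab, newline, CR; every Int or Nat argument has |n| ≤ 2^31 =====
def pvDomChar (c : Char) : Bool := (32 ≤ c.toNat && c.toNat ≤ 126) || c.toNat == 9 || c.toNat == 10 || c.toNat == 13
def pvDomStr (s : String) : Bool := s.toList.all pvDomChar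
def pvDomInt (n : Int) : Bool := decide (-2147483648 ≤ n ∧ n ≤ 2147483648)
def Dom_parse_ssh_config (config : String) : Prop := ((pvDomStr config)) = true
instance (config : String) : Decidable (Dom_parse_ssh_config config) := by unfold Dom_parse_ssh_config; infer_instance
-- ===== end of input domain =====

-- B parses the config in two passes (split into host blocks, then parse each block's body)
-- instead of A's single stateful loop; same cost, different decomposition.

-- ===== PORT A =====

-- `line.split(" ", 1)[1]`: the text after the first space.  Every line this is applied
-- to is a stripped line starting with "Host ", so the split always has a second piece
-- and the `[]` / `""` fallbacks are unreachable.
def hostAfterSplit (line : String) : String :=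
  ((PySem.Str.splitMax? line " " 1).getD []).getD 1 ""

-- the loop body of A, on the already-stripped line.
-- `elif current_host and line:`: once set, current_host is the non-empty remainder of a
-- stripped "Host " header (a stripped line never ends in a space), so its truthiness is
-- exactly its being set; it is ported as the `some` match.
-- `hosts[current_host][key] = value` is `Dict.modify` (current_host is always present).
def stepCore (st : PySem.Dict String (PySem.Dict String String) × Option String)
    (line : String) : PySem.Dict String (PySem.Dict String String) × Option String :=
  if PySem.Str.startswith line "Host " then
    let h := hostAfterSplit line
    (st.1.insert h PySem.Dict.empty, some h)
  else
    match st.2 with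
    | some c =>
        if line ≠ "" then
          match (PySem.Str.splitMax? line " " 1).getD [] with
          | k :: v :: _ => (st.1.modify c PySem.Dict.empty (fun d => d.insert k v), some c)
          | _ => (st.1, some c)   -- Python raises ValueError here (excluded by Pre_)
        else (st.1, some c)
    | none => (st.1, none)

-- `line = line.strip()` then the branches
def stepA (st : PySem.Dict String (PySem.Dict String String) × Option String)
    (raw : String) : PySem.Dict String (PySem.Dict String String) × Option String :=
  stepCore st (PySem.Str.strip raw)

def parse_ssh_config (config : String) : List (String × List (String × String)) :=
  (((PySem.Str.splitlines config).foldl stepA (PySem.Dict.empty, none)).1).items.map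
    (fun p => (p.1, p.2.items))

-- ===== PORT B =====

def isHostLine (line : String) : Bool := PySem.Str.startswith line "Host "

-- `_host_blocks`: group the stripped lines into (hostname, body) blocks, one per
-- "Host " header (the inner while-scan is the takeWhile/dropWhile split of the rest);
-- lines before the first header are discarded.
def blocksB : List String → List (String × List String)
  | [] => []
  | l :: rest =>
    if isHostLine l then
      (hostAfterSplit l, rest.takeWhile (fun x => !isHostLine x)) ::
        blocksB (rest.dropWhile (fun x => !isHostLine x))
    else
      blocksB rest
termination_by ls => ls.length
decreasing_by
  · have := List.length_dropWhile_le (fun x => !isHostLine x) rest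
    simp only [List.length_cons]
    omega
  · simp

-- the inner `for line in body` loop of B
def entryStep (d : PySem.Dict String String) (line : String) : PySem.Dict String String :=
  if line ≠ "" then
    match (PySem.Str.splitMax? line " " 1).getD [] with
    | k :: v :: _ => d.insert k v
    | _ => d            -- Python raises ValueError here (excluded by Pre_)
  else d

def parseEntry (body : List String) : PySem.Dict String String :=
  body.foldl entryStep PySem.Dict.empty

def parse_ssh_config_alt (config : String) : List (String × List (String × String)) :=
  let stripped := (PySem.Str.splitlines config).map PySem.Str.strip
  ((blocksB stripped).foldl
      (fun h b => h.insert b.1 (parseEntry b.2)) PySem.Dict.empty).items.map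
    (fun p => (p.1, p.2.items))

-- ===== PRECONDITION & SPEC =====
-- Pre_ excludes exactly the configs on which Python raises ValueError: a stripped line
-- with no space that is non-empty, is not a "Host " header, and follows some header.
def Pre_parse_ssh_config (config : String) : Prop :=
  ∀ i < ((PySem.Str.splitlines config).map PySem.Str.strip).length,
    (((PySem.Str.splitlines config).map PySem.Str.strip).getD i "" ≠ "" ∧
      isHostLine (((PySem.Str.splitlines config).map PySem.Str.strip).getD i "") = false ∧
      ∃ j < i, isHostLine (((PySem.Str.splitlines config).map PySem.Str.strip).getD j "") = true) →
    PySem.Str.isIn " " (((PySem.Str.splitlines config).map PySem.Str.strip).getD i "") = true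

instance (config : String) : Decidable (Pre_parse_ssh_config config) := by
  unfold Pre_parse_ssh_config; infer_instance

def pvWitness_parse_ssh_config : String := "Host dev\nUser root\n\nHost  prod x\nPort 22 ok"

def Spec_parse_ssh_config (config : String) (out : List (String × List (String × String))) : Prop :=
  out = parse_ssh_config_alt config
instance (config : String) (out : List (String × List (String × String))) :
    Decidable (Spec_parse_ssh_config config out) := by unfold Spec_parse_ssh_config; infer_instance

-- ===== CLAIM (what is proved, stated in full; the proofs are below) =====
def Claim_equal_parse_ssh_config : Prop :=
  ∀ (config : String), Dom_parse_ssh_config config → Pre_parse_ssh_config config →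
    Spec_parse_ssh_config config (parse_ssh_config config)

-- ===== LEMMAS AND PROOFS =====

theorem blocksB_nil : blocksB [] = [] := by rw [blocksB]

theorem blocksB_cons_header {l : String} {rest : List String} (hl : isHostLine l = true) :
    blocksB (l :: rest) =
      (hostAfterSplit l, rest.takeWhile (fun x => !isHostLine x)) ::
        blocksB (rest.dropWhile (fun x => !isHostLine x)) := by
  rw [blocksB]; simp [hl]

theorem blocksB_cons_nonheader {l : String} {rest : List String} (hl : isHostLine l = false) :
    blocksB (l :: rest) = blocksB rest := by
  rw [blocksB]; simp [hl]

theorem stepCore_nonheader (h : PySem.Dict String (PySem.Dict String String))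
    (c : String) (d : PySem.Dict String String) (l : String)
    (hl : isHostLine l = false) :
    stepCore (h.insert c d, some c) l = (h.insert c (entryStep d l), some c) := by
  unfold stepCore entryStep
  unfold isHostLine at hl
  rw [hl]
  by_cases hne : l = ""
  · simp [hne]
  · simp only [hne, ne_eq, not_false_eq_true, if_true]
    cases hsp : (PySem.Str.splitMax? l " " 1).getD [] with
    | nil => rfl
    | cons k t =>
      cases t with
      | nil => rfl
      | cons v t' =>
        simp [PySem.Dict.modify, PySem.Dict.getD_insert_self, PySem.Dict.insert_insert_self]

theorem mainSome (ls : List String) :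
    ∀ (h : PySem.Dict String (PySem.Dict String String)) (c : String)
      (d : PySem.Dict String String),
    (ls.foldl stepCore (h.insert c d, some c)).1 =
      (blocksB (ls.dropWhile (fun x => !isHostLine x))).foldl
        (fun h b => h.insert b.1 (parseEntry b.2))
        (h.insert c ((ls.takeWhile (fun x => !isHostLine x)).foldl entryStep d)) := by
  induction ls with
  | nil => intro h c d; simp [blocksB_nil]
  | cons l rest ih =>
    intro h c d
    by_cases hl : isHostLine l = true
    · have hstep : stepCore (h.insert c d, some c) l =
          ((h.insert c d).insert (hostAfterSplit l) PySem.Dict.empty,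
            some (hostAfterSplit l)) := by
        unfold stepCore
        unfold isHostLine at hl
        rw [hl]
        rfl
      rw [List.foldl_cons, hstep, ih (h.insert c d) (hostAfterSplit l) PySem.Dict.empty]
      have hd : (l :: rest).dropWhile (fun x => !isHostLine x) = l :: rest := by
        simp [hl]
      have ht : (l :: rest).takeWhile (fun x => !isHostLine x) = [] := by
        simp [hl]
      rw [hd, ht, blocksB_cons_header hl, List.foldl_cons]
      rfl
    · have hl' : isHostLine l = false := by simpa using hl
      rw [List.foldl_cons, stepCore_nonheader h c d l hl',
        ih h c (entryStep d l)]
      simp [hl']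

theorem mainNone (ls : List String) :
    ∀ (h : PySem.Dict String (PySem.Dict String String)),
    (ls.foldl stepCore (h, none)).1 =
      (blocksB ls).foldl (fun h b => h.insert b.1 (parseEntry b.2)) h := by
  induction ls with
  | nil => intro h; simp [blocksB_nil]
  | cons l rest ih =>
    intro h
    by_cases hl : isHostLine l = true
    · have hstep : stepCore (h, none) l =
          (h.insert (hostAfterSplit l) PySem.Dict.empty, some (hostAfterSplit l)) := by
        unfold stepCore
        unfold isHostLine at hl
        rw [hl]
        rfl
      rw [List.foldl_cons, hstep, mainSome rest h (hostAfterSplit l) PySem.Dict.empty,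
        blocksB_cons_header hl, List.foldl_cons]
      rfl
    · have hl' : isHostLine l = false := by simpa using hl
      have hstep : stepCore (h, none) l = (h, none) := by
        unfold stepCore
        unfold isHostLine at hl'
        rw [hl']
        rfl
      rw [List.foldl_cons, hstep, ih h, blocksB_cons_nonheader hl']

-- ===== VERDICT (by name: the statement is the Claim_ definition above) =====
theorem parse_ssh_config_spec : Claim_equal_parse_ssh_config := by
  intro config _ _
  unfold Spec_parse_ssh_config parse_ssh_config parse_ssh_config_alt
  have hmap : (PySem.Str.splitlines config).foldl stepA (PySem.Dict.empty, none) =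
      ((PySem.Str.splitlines config).map PySem.Str.strip).foldl stepCore
        (PySem.Dict.empty, none) := by
    rw [List.foldl_map]
    rfl
  rw [hmap, mainNone]
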